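-- pv_equiv track=rewrite | github.com/aivibe-collective/ai-hub-content | generate_content_batch_improved.py | filter_content_items
-- ===== SOURCE A (Python) =====
-- from typing import List, Dict, Set, Optional, Tuple
--
-- def filter_content_items(content_items: List[Dict],
--                         status: Optional[str] = None,
--                         content_ids: Optional[List[str]] = None,
--                         section: Optional[str] = None) -> List[Dict]:
--     """Filter content items based on criteria.
--
--     Args:
--         content_items: List of content inventory items
--         status: Filter by status (e.g., "Not Started")
--         content_ids: Filter by specific content IDs
--         section: Filter by section
--
--     Returns:
--         Filtered list of content items
--     """
--     filtered_items = content_items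
--
--     if status:
--         filtered_items = [item for item in filtered_items if item.get('status') == status]
--
--     if content_ids:
--         filtered_items = [item for item in filtered_items if item.get('content_id') in content_ids]
--
--     if section:
--         filtered_items = [item for item in filtered_items if item.get('section') == section]
--
--     return filtered_items
-- ===== SOURCE B (Python) =====
-- def filter_content_items(content_items, status=None, content_ids=None, section=None):
--     """Table-driven: build a table of (key, allowed-values set) checks once, then keep
--     items passing every check, in one explicit accumulator loop."""
--     checks = []
--     if status:
--         checks.append(('status', {status}))
--     if content_ids:
--         checks.append(('content_id', set(content_ids)))
--     if section:
--         checks.append(('section', {section}))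
--     result = []
--     for item in content_items:
--         if all(item.get(key) in allowed for key, allowed in checks):
--             result.append(item)
--     return result
-- ===== Notes on version B (the rewrite author's own statement) =====
-- stated objective: alternative
-- what changed: Replaces three hard-coded, sequentially guarded filtering comprehensions with a data-driven design: a table of (key, allowed-value-set) checks is built once from the active criteria, and one accumulator loop keeps the items whose every table entry passes a uniform set-membership test.
import Mathlib
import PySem

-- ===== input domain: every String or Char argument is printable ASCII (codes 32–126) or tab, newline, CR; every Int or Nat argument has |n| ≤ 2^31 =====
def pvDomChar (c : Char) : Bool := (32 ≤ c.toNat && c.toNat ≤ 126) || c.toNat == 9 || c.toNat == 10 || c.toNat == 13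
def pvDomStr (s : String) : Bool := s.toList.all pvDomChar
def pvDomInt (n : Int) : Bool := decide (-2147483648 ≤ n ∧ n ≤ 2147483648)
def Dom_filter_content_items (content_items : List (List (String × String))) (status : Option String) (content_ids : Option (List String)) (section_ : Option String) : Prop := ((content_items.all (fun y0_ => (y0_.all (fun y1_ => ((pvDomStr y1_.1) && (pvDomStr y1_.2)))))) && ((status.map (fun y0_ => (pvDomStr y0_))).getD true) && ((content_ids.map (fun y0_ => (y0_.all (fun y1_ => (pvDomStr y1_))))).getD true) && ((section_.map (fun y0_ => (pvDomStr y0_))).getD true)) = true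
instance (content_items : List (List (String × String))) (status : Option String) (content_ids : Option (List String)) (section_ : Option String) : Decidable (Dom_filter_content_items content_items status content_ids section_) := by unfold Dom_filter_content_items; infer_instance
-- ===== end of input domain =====

-- B is table-driven: it builds a table of (key, allowed-value set) checks once and keeps items
-- passing every table entry in one accumulator loop, instead of A's three guarded passes; objective: alternative.

-- ===== PORT A =====
-- up to three sequential list-comprehension passes, each guarded by the truthiness of its criterion
def filter_content_items (content_items : List (List (String × String))) (status : Option String) (content_ids : Option (List String)) (section_ : Option String) : List (List (String × String)) :=
  let fi := content_items
  let fi := match status with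
    | some s => if s == "" then fi else fi.filter (fun item => PySem.Dict.get? (PySem.Dict.mk item) "status" == some s)
    | none => fi
  let fi := match content_ids with
    | some ids => if ids.isEmpty then fi else
        fi.filter (fun item => match PySem.Dict.get? (PySem.Dict.mk item) "content_id" with
          | some v => ids.contains v
          | none => false)
    | none => fi
  let fi := match section_ with
    | some s => if s == "" then fi else fi.filter (fun item => PySem.Dict.get? (PySem.Dict.mk item) "section" == some s)
    | none => fi
  fi

-- ===== PORT B =====
-- the table of active checks, built once ('checks' in Source B)
def fciChecks (status : Option String) (content_ids : Option (List String)) (section_ : Option String) : List (String × PySem.Set String) :=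
  let cs : List (String × PySem.Set String) := []
  let cs := match status with
    | some s => if s == "" then cs else cs ++ [("status", PySem.Set.ofList [s])]
    | none => cs
  let cs := match content_ids with
    | some l => if l.isEmpty then cs else cs ++ [("content_id", PySem.Set.ofList l)]
    | none => cs
  let cs := match section_ with
    | some s => if s == "" then cs else cs ++ [("section", PySem.Set.ofList [s])]
    | none => cs
  cs

-- one accumulator loop: keep item iff every (key, allowed) entry of the table passes
def filter_content_items_alt (content_items : List (List (String × String))) (status : Option String) (content_ids : Option (List String)) (section_ : Option String) : List (List (String × String)) :=
  let checks := fciChecks status content_ids section_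
  content_items.foldl (fun acc item =>
    if checks.all (fun c => match PySem.Dict.get? (PySem.Dict.mk item) c.1 with
        | some v => PySem.Set.contains c.2 v
        | none => false)
    then acc ++ [item] else acc) []

-- ===== PRECONDITION & SPEC =====
def Spec_filter_content_items (content_items : List (List (String × String))) (status : Option String) (content_ids : Option (List String)) (section_ : Option String) (out : List (List (String × String))) : Prop := out = filter_content_items_alt content_items status content_ids section_
instance (content_items : List (List (String × String))) (status : Option String) (content_ids : Option (List String)) (section_ : Option String) (out : List (List (String × String))) : Decidable (Spec_filter_content_items content_items status content_ids section_ out) := by unfold Spec_filter_content_items; infer_instance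

-- ===== CLAIM (what is proved, stated in full; the proofs are below) =====
def Claim_equal_filter_content_items : Prop := ∀ (content_items : List (List (String × String))) (status : Option String) (content_ids : Option (List String)) (section_ : Option String), Dom_filter_content_items content_items status content_ids section_ → Spec_filter_content_items content_items status content_ids section_ (filter_content_items content_items status content_ids section_)

-- ===== LEMMAS AND PROOFS =====

-- membership in a PySem.Set built from a list agrees with list membership
theorem fci_set_contains (l : List String) (v : String) :
    PySem.Set.contains (PySem.Set.ofList l) v = l.contains v := by
  simp [PySem.Set.contains_iff, PySem.Set.mem_ofList, List.contains_iff_mem]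

-- ===== VERDICT (by name: the statement is the Claim_ definition above) =====
set_option maxRecDepth 8192 in
theorem filter_content_items_spec : Claim_equal_filter_content_items := by
  intro ci status cids sec _
  unfold Spec_filter_content_items filter_content_items filter_content_items_alt
  rw [PySem.List.foldl_append_if_eq_filter]
  simp only [List.nil_append]
  unfold fciChecks
  rcases status with _ | s <;> rcases cids with _ | l <;> rcases sec with _ | t <;>
    (try by_cases h1 : (s == "") = true) <;>
    (try by_cases h2 : l.isEmpty = true) <;>
    (try by_cases h3 : (t == "") = true) <;>
    simp_all [List.filter_filter, List.all_cons, List.all_nil, fci_set_contains] <;>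
    (refine List.filter_congr fun item _ => ?_ ;
     cases PySem.Dict.get? (PySem.Dict.mk item) "status" <;>
     cases PySem.Dict.get? (PySem.Dict.mk item) "content_id" <;>
     cases PySem.Dict.get? (PySem.Dict.mk item) "section" <;>
     simp_all [beq_eq_decide, Bool.and_comm, Bool.and_assoc, Bool.and_left_comm])
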